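-- pv_equiv track=rewrite | github.com/probably-jb/AdventOfCode | 2024/02/Part 1.py | is_safe_ascending
-- ===== SOURCE A (Python) =====
-- def is_safe_ascending(items):
--     for i in range(len(items) - 1):
--         if items != sorted(items):
--             return False
--         distance = abs(items[i] - items[i + 1])
--         if distance < 1 or distance > 3:
--             return False
--     return True
-- ===== SOURCE B (Python) =====
-- def is_safe_ascending(items):
--     # single pass: every adjacent gap must be between 1 and 3 (which also implies sortedness)
--     return all(1 <= b - a <= 3 for a, b in zip(items, items[1:]))
-- ===== Notes on version B (the rewrite author's own statement) =====
-- stated objective: faster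
-- what changed: Replaced the loop that re-sorts the whole list at every index and tests |gap| with one linear pass over adjacent pairs checking 1 <= b - a <= 3, which subsumes the sortedness test.
import Mathlib
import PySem

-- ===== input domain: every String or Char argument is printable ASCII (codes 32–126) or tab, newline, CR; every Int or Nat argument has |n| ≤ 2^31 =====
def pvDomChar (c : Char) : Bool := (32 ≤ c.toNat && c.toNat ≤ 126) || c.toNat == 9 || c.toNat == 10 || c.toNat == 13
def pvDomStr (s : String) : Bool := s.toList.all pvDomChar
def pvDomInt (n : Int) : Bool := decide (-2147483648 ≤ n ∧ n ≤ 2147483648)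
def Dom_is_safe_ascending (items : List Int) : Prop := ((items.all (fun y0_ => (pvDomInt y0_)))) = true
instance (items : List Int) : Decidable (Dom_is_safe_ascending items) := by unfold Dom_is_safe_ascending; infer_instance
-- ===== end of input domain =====

-- B replaces A's per-index full re-sort + |gap| test with one linear pass over adjacent pairs (objective: faster).


-- ===== PORT A =====
-- loop body for 'for i in range(len(items)-1)': k = number of indices still to process.
-- items[i] / items[i+1] are ported with PySem.List.pyGetD with default 0: the loop only
-- reaches indices 0 ≤ i, i+1 ≤ len-1, where pyGetD equals Python's items[i] exactly.
def isSafeGo (items : List Int) (i : Nat) : Nat → Bool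
  | 0 => true
  | k + 1 =>
    if items ≠ PySem.List.sorted items (fun x => x) false then false
    else
      let distance := |PySem.List.pyGetD items (i : Int) 0 - PySem.List.pyGetD items ((i : Int) + 1) 0|
      if distance < 1 ∨ distance > 3 then false
      else isSafeGo items (i + 1) k

def is_safe_ascending (items : List Int) : Bool :=
  isSafeGo items 0 (items.length - 1)

-- ===== PORT B =====
-- all(1 <= b - a <= 3 for a, b in zip(items, items[1:])): structural pass over adjacent pairs.
def is_safe_ascending_alt : List Int → Bool
  | a :: b :: rest => (decide (1 ≤ b - a) && decide (b - a ≤ 3)) && is_safe_ascending_alt (b :: rest)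
  | _ => true

-- ===== PRECONDITION & SPEC =====
def Spec_is_safe_ascending (items : List Int) (out : Bool) : Prop := out = is_safe_ascending_alt items
instance (items : List Int) (out : Bool) : Decidable (Spec_is_safe_ascending items out) := by unfold Spec_is_safe_ascending; infer_instance

-- ===== CLAIM (what is proved, stated in full; the proofs are below) =====
def Claim_equal_is_safe_ascending : Prop := ∀ (items : List Int), Dom_is_safe_ascending items → Spec_is_safe_ascending items (is_safe_ascending items)

-- ===== LEMMAS AND PROOFS =====

-- if B accepts, the adjacent gaps are ≥ 1, so the list is strictly increasing
theorem alt_chain_lt (xs : List Int) (h : is_safe_ascending_alt xs = true) :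
    List.IsChain (fun a b : Int => a < b) xs := by
  induction xs with
  | nil => simp
  | cons a t ih =>
    cases t with
    | nil => simp
    | cons b r =>
      simp only [is_safe_ascending_alt, Bool.and_eq_true, decide_eq_true_iff] at h
      exact List.isChain_cons_cons.mpr ⟨by omega, ih h.2⟩

-- hence B accepting forces A's sortedness test to pass
theorem alt_sorted (xs : List Int) (h : is_safe_ascending_alt xs = true) :
    PySem.List.sorted xs (fun x => x) false = xs :=
  PySem.List.sorted_eq_of_perm_of_pairwise_lt xs xs (fun x => x) (List.Perm.refl xs)
    ((List.isChain_iff_pairwise (R := (· < · : Int → Int → Prop))).mp (alt_chain_lt xs h))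

theorem alt_short (xs : List Int) (h : xs.length ≤ 1) : is_safe_ascending_alt xs = true := by
  match xs, h with
  | [], _ => rfl
  | [a], _ => rfl

-- the sorted-case invariant: with the sortedness check passing, A's loop from index i
-- computes B on the suffix items.drop i
theorem go_eq_alt (items : List Int) (hs : PySem.List.sorted items (fun x => x) false = items)
    (k i : Nat) (hlen : i + k + 1 = items.length) :
    isSafeGo items i k = is_safe_ascending_alt (items.drop i) := by
  induction k generalizing i with
  | zero =>
    have : (items.drop i).length ≤ 1 := by simp; omega
    simp [isSafeGo, alt_short _ this]
  | succ k ih =>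
    have hi : i < items.length := by omega
    have hi1 : i + 1 < items.length := by omega
    have hpw : items.Pairwise (· ≤ ·) := by
      have := PySem.List.sorted_pairwise items (fun x => x) (κ := Int)
      rwa [hs] at this
    have hab : items[i] ≤ items[i + 1] :=
      List.pairwise_iff_getElem.mp hpw i (i+1) hi hi1 (by omega)
    have hga : PySem.List.pyGetD items (i : Int) 0 = items[i] := by
      rw [PySem.List.pyGetD_natCast]
      exact List.getD_eq_getElem _ _ hi
    have hgb : PySem.List.pyGetD items ((i : Int) + 1) 0 = items[i + 1] := by
      have hc : ((i : Int) + 1) = ((i + 1 : Nat) : Int) := by push_cast; ring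
      rw [hc, PySem.List.pyGetD_natCast]
      exact List.getD_eq_getElem _ _ hi1
    have hdrop : items.drop i = items[i] :: items.drop (i + 1) := List.drop_eq_getElem_cons hi
    have hdrop1 : items.drop (i + 1) = items[i + 1] :: items.drop (i + 2) := List.drop_eq_getElem_cons hi1
    rw [isSafeGo]
    simp only [hs, ne_eq, not_true_eq_false, if_false, hga, hgb]
    rw [hdrop, hdrop1, is_safe_ascending_alt]
    rw [← hdrop1, ih (i + 1) (by omega)]
    have habs : |items[i] - items[i + 1]| = items[i + 1] - items[i] := by
      rw [abs_sub_comm]; exact abs_of_nonneg (by omega)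
    rw [habs]
    by_cases hgap : 1 ≤ items[i + 1] - items[i] ∧ items[i + 1] - items[i] ≤ 3
    · rw [if_neg (by omega)]
      simp [hgap.1, hgap.2]
    · rw [if_pos (by omega)]
      have h1 : (decide (1 ≤ items[i + 1] - items[i]) && decide (items[i + 1] - items[i] ≤ 3)) = false := by
        simp only [Bool.and_eq_false_iff, decide_eq_false_iff_not]; tauto
      rw [h1, Bool.false_and]

-- ===== VERDICT (by name: the statement is the Claim_ definition above) =====
theorem is_safe_ascending_spec : Claim_equal_is_safe_ascending := by
  intro items _
  unfold Spec_is_safe_ascending is_safe_ascending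
  match items with
  | [] => rfl
  | [a] => rfl
  | a :: b :: t =>
    by_cases hs : PySem.List.sorted (a :: b :: t) (fun x => x) false = a :: b :: t
    · have := go_eq_alt (a :: b :: t) hs (t.length + 1) 0 (by simp)
      simpa using this
    · have hA : isSafeGo (a :: b :: t) 0 ((a :: b :: t).length - 1) = false := by
        show isSafeGo (a :: b :: t) 0 (t.length + 1) = false
        rw [isSafeGo, if_pos (fun h => hs h.symm)]
      have hB : is_safe_ascending_alt (a :: b :: t) = false := by
        cases hb : is_safe_ascending_alt (a :: b :: t) with
        | false => rfl
        | true => exact absurd (alt_sorted _ hb) hs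
      rw [hA, hB]
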